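-- pv_equiv track=rewrite | github.com/kralluz/Exercicios-Phyton | 📖 Atividade - 🧠 Lógica - Exercitando Loops e Condicionais/main.py | remove_more_than_two_repetitions
-- ===== SOURCE A (Python) =====
-- def remove_more_than_two_repetitions(str: str):
--     new_char = ""
--     for char in range(len(str)):
--         if char < 2:
--             new_char += str[char]
--         elif not (str[char] == str[char - 1] == str[char - 2]):
--             new_char += str[char]
--     return new_char
-- ===== SOURCE B (Python) =====
-- def remove_more_than_two_repetitions(str):
--     runs = []
--     for ch in str:
--         if runs and runs[-1][0] == ch:
--             runs[-1][1] += 1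
--         else:
--             runs.append([ch, 1])
--     return "".join(c * min(2, n) for c, n in runs)
-- ===== Notes on version B (the rewrite author's own statement) =====
-- stated objective: alternative
-- what changed: Replaces the index scan comparing each char to the previous two with a run-grouping pass: the string is split into maximal runs of equal consecutive chars and each run is capped at length two.
import Mathlib
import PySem

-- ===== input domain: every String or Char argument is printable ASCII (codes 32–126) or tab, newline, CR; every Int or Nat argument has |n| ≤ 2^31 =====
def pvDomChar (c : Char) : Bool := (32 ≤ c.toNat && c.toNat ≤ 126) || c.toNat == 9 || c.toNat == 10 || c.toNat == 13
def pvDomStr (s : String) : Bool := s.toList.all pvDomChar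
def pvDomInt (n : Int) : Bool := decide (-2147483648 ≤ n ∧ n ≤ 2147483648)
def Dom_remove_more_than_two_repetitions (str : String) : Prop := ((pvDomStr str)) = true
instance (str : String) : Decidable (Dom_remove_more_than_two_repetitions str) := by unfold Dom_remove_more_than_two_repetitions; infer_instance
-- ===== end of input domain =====

-- B replaces A's compare-with-the-two-previous-chars index scan by a run-grouping pass
-- that caps each maximal run of equal consecutive characters at length two (alternative decomposition, same cost).


-- ===== PORT A =====
-- loop body of A: 'if char < 2: keep; elif not (str[char]==str[char-1]==str[char-2]): keep'
-- (accumulator is the List Char behind new_char; str[i] is PySem.List.pyGet?, always in range here)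
def aStep (l : List Char) (acc : List Char) (i : Int) : List Char :=
  if i < 2 then acc ++ (PySem.List.pyGet? l i).toList
  else if ¬(PySem.List.pyGet? l i = PySem.List.pyGet? l (i - 1) ∧
            PySem.List.pyGet? l (i - 1) = PySem.List.pyGet? l (i - 2)) then
    acc ++ (PySem.List.pyGet? l i).toList
  else acc

def remove_more_than_two_repetitions (str : String) : String :=
  String.mk ((PySem.List.pyRange 0 (str.toList.length : Int) 1).foldl (aStep str.toList) [])

-- ===== PORT B =====
-- B's loop body: runs are kept in REVERSE order (head = Python's runs[-1]), so the
-- 'runs and runs[-1][0] == ch' update/append is a head match; reversed back before joining.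
def bStep (runs : List (Char × Nat)) (c : Char) : List (Char × Nat) :=
  match runs with
  | (c', n) :: rest => if c' = c then (c', n + 1) :: rest else (c, 1) :: (c', n) :: rest
  | [] => [(c, 1)]

def remove_more_than_two_repetitions_alt (str : String) : String :=
  String.mk (((str.toList.foldl bStep []).reverse).flatMap
    (fun p => List.replicate (min 2 p.2) p.1))

-- ===== PRECONDITION & SPEC =====
def Spec_remove_more_than_two_repetitions (str : String) (out : String) : Prop := out = remove_more_than_two_repetitions_alt str
instance (str : String) (out : String) : Decidable (Spec_remove_more_than_two_repetitions str out) := by unfold Spec_remove_more_than_two_repetitions; infer_instance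

-- ===== CLAIM (what is proved, stated in full; the proofs are below) =====
def Claim_equal_remove_more_than_two_repetitions : Prop := ∀ (str : String), Dom_remove_more_than_two_repetitions str → Spec_remove_more_than_two_repetitions str (remove_more_than_two_repetitions str)

-- ===== LEMMAS AND PROOFS =====

def outA (l : List Char) : List Char :=
  (PySem.List.pyRange 0 (l.length : Int) 1).foldl (aStep l) []

def outB (l : List Char) : List Char :=
  ((l.foldl bStep []).reverse).flatMap (fun p => List.replicate (min 2 p.2) p.1)

-- invariant of B's run list: head run char is the last char of l, and its length is ≥ 2
-- exactly when the two last chars of l agree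
def RunInv (l : List Char) : Prop :=
  match l.foldl bStep [] with
  | [] => l = []
  | (c, m) :: _ =>
      1 ≤ m ∧ l[l.length - 1]? = some c ∧
        (2 ≤ m ↔ (2 ≤ l.length ∧ l[l.length - 2]? = some c))

lemma foldl_bStep_concat (l : List Char) (x : Char) :
    (l ++ [x]).foldl bStep [] = bStep (l.foldl bStep []) x := by
  simp [List.foldl_append]

lemma inv_holds (l : List Char) : RunInv l := by
  induction l using List.reverseRecOn with
  | nil => simp [RunInv]
  | append_singleton l x ih =>
    unfold RunInv
    rw [foldl_bStep_concat]
    unfold RunInv at ih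
    cases h : l.foldl bStep [] with
    | nil =>
      rw [h] at ih; subst ih
      simp [bStep]
    | cons p rest =>
      obtain ⟨c, m⟩ := p
      rw [h] at ih
      obtain ⟨h1, h2, h3⟩ := ih
      have hn : 1 ≤ l.length := by
        by_contra hcon
        interval_cases hl : l.length <;> simp_all [List.eq_nil_of_length_eq_zero]
      by_cases hc : c = x
      · subst hc
        simp only [bStep, if_pos rfl]
        refine ⟨by omega, ?_, ?_⟩
        · simpa using List.getElem?_concat_length l x
        · constructor
          · intro _
            refine ⟨by simpa using by omega, ?_⟩
            have e : (l ++ [c]).length - 2 = l.length - 1 := by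
              simp only [List.length_append, List.length_cons, List.length_nil]; omega
            rw [e, List.getElem?_append_left (by omega)]
            exact h2
          · intro _; omega
      · simp only [bStep, if_neg hc]
        refine ⟨le_refl 1, by simpa using List.getElem?_concat_length l x, ?_⟩
        constructor
        · intro hcon; omega
        · rintro ⟨-, hget⟩
          have e : (l ++ [x]).length - 2 = l.length - 1 := by
            simp only [List.length_append, List.length_cons, List.length_nil]; omega
          rw [e, List.getElem?_append_left (by omega), h2] at hget
          exact absurd (Option.some.inj hget) hc

lemma pyGet?_append_left_of_lt (l : List Char) (x : Char) (j : Int)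
    (h0 : 0 ≤ j) (h1 : j < l.length) :
    PySem.List.pyGet? (l ++ [x]) j = PySem.List.pyGet? l j := by
  rw [PySem.List.pyGet?_of_nonneg _ h0, PySem.List.pyGet?_of_nonneg _ h0]
  rw [List.getElem?_append_left (by omega)]

lemma aStep_congr (l : List Char) (x : Char) (acc : List Char) (i : Int)
    (h0 : 0 ≤ i) (h1 : i < l.length) :
    aStep (l ++ [x]) acc i = aStep l acc i := by
  unfold aStep
  by_cases h2 : i < 2
  · rw [if_pos h2, if_pos h2, pyGet?_append_left_of_lt l x i h0 h1]
  · rw [if_neg h2, if_neg h2,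
      pyGet?_append_left_of_lt l x i h0 h1,
      pyGet?_append_left_of_lt l x (i - 1) (by omega) (by omega),
      pyGet?_append_left_of_lt l x (i - 2) (by omega) (by omega)]

lemma aStep_last (l : List Char) (x : Char) (acc : List Char) :
    aStep (l ++ [x]) acc (l.length : Int) =
      acc ++ (if 2 ≤ l.length ∧ l[l.length - 1]? = some x ∧ l[l.length - 2]? = some x
              then [] else [x]) := by
  unfold aStep
  have hget : PySem.List.pyGet? (l ++ [x]) (l.length : Int) = some x := by
    rw [PySem.List.pyGet?_of_nonneg _ (Int.natCast_nonneg _)]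
    simpa using List.getElem?_concat_length l x
  by_cases h2 : (l.length : Int) < 2
  · rw [if_pos h2, hget]
    have : ¬ (2 ≤ l.length ∧ l[l.length - 1]? = some x ∧ l[l.length - 2]? = some x) := by
      rintro ⟨h, -, -⟩; omega
    rw [if_neg this]
    rfl
  · have hlen : 2 ≤ l.length := by omega
    rw [if_neg h2, hget]
    have e1 : PySem.List.pyGet? (l ++ [x]) ((l.length : Int) - 1) = l[l.length - 1]? := by
      rw [show ((l.length : Int) - 1) = ((l.length - 1 : Nat) : Int) by omega,
        PySem.List.pyGet?_natCast, List.getElem?_append_left (by omega)]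
    have e2 : PySem.List.pyGet? (l ++ [x]) ((l.length : Int) - 2) = l[l.length - 2]? := by
      rw [show ((l.length : Int) - 2) = ((l.length - 2 : Nat) : Int) by omega,
        PySem.List.pyGet?_natCast, List.getElem?_append_left (by omega)]
    rw [e1, e2]
    by_cases hd : l[l.length - 1]? = some x ∧ l[l.length - 2]? = some x
    · obtain ⟨ha, hb⟩ := hd
      rw [if_neg (not_not_intro ⟨ha.symm, ha.trans hb.symm⟩), if_pos ⟨hlen, ha, hb⟩]
      simp
    · have : ¬ (some x = l[l.length - 1]? ∧ l[l.length - 1]? = l[l.length - 2]?) := by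
        rintro ⟨ha, hb⟩
        exact hd ⟨ha.symm, hb.symm.trans ha.symm⟩
      rw [if_pos this, if_neg (by rintro ⟨-, ha, hb⟩; exact hd ⟨ha, hb⟩)]
      rfl

lemma foldl_aStep_congr (l : List Char) (x : Char) :
    (PySem.List.pyRange 0 (l.length : Int) 1).foldl (aStep (l ++ [x])) [] =
      (PySem.List.pyRange 0 (l.length : Int) 1).foldl (aStep l) [] := by
  apply List.foldl_ext
  intro acc i hi
  rw [PySem.List.mem_pyRange_one] at hi
  exact aStep_congr l x acc i hi.1 hi.2

lemma outB_cons (l : List Char) (c : Char) (m : Nat) (rest : List (Char × Nat))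
    (h : l.foldl bStep [] = (c, m) :: rest) :
    outB l = (rest.reverse.flatMap (fun p => List.replicate (min 2 p.2) p.1)) ++
      List.replicate (min 2 m) c := by
  simp [outB, h]

lemma outA_eq_outB (l : List Char) : outA l = outB l := by
  induction l using List.reverseRecOn with
  | nil => simp [outA, outB, PySem.List.pyRange]
  | append_singleton l x ih =>
    have hlen : (((l ++ [x]).length : Nat) : Int) = (l.length : Int) + 1 := by
      simp
    have hrange : PySem.List.pyRange 0 (((l ++ [x]).length : Nat) : Int) 1 =
        PySem.List.pyRange 0 (l.length : Int) 1 ++ [(l.length : Int)] := by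
      rw [hlen, PySem.List.pyRange_one_succ_right (Int.natCast_nonneg _)]
    have hinv := inv_holds l
    unfold RunInv at hinv
    unfold outA
    rw [hrange, List.foldl_append, List.foldl_cons, List.foldl_nil,
      foldl_aStep_congr l x, aStep_last]
    unfold outA at ih
    rw [ih]
    cases h : l.foldl bStep [] with
    | nil =>
      rw [h] at hinv; subst hinv
      simp [outB, bStep]
    | cons p rest =>
      obtain ⟨c, m⟩ := p
      rw [h] at hinv
      obtain ⟨h1, h2, h3⟩ := hinv
      have hbnew := foldl_bStep_concat l x
      rw [h] at hbnew
      by_cases hc : c = x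
      · subst hc
        simp only [bStep, if_pos rfl] at hbnew
        by_cases hm : 2 ≤ m
        · -- run already capped: A drops the char, B's contribution is unchanged
          have hcond : 2 ≤ l.length ∧ l[l.length - 1]? = some c ∧ l[l.length - 2]? = some c :=
            ⟨(h3.mp hm).1, h2, (h3.mp hm).2⟩
          rw [if_pos hcond, outB_cons l c m rest h, outB_cons (l ++ [c]) c (m + 1) rest hbnew]
          have : min 2 (m + 1) = min 2 m := by omega
          rw [this]
          simp
        · -- run of length 1 grows to 2: both append the char
          have hm1 : m = 1 := by omega
          have hcond : ¬ (2 ≤ l.length ∧ l[l.length - 1]? = some c ∧ l[l.length - 2]? = some c) := by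
            rintro ⟨ha, -, hb⟩
            exact hm (h3.mpr ⟨ha, hb⟩)
          rw [if_neg hcond, outB_cons l c m rest h, outB_cons (l ++ [c]) c (m + 1) rest hbnew, hm1]
          simp [List.replicate_succ']
      · -- new run starts: both append the char
        simp only [bStep, if_neg hc] at hbnew
        have hcond : ¬ (2 ≤ l.length ∧ l[l.length - 1]? = some x ∧ l[l.length - 2]? = some x) := by
          rintro ⟨-, ha, -⟩
          rw [h2] at ha
          exact hc (Option.some.inj ha)
        rw [if_neg hcond, outB_cons l c m rest h, outB_cons (l ++ [x]) x 1 ((c, m) :: rest) hbnew]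
        simp

-- ===== VERDICT (by name: the statement is the Claim_ definition above) =====
theorem remove_more_than_two_repetitions_spec : Claim_equal_remove_more_than_two_repetitions := by
  intro s _
  show remove_more_than_two_repetitions s = remove_more_than_two_repetitions_alt s
  have := outA_eq_outB s.toList
  unfold outA outB at this
  unfold remove_more_than_two_repetitions remove_more_than_two_repetitions_alt
  rw [this]
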